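-- pv_equiv track=rewrite | github.com/Daillusorisch/DAS-Hoster | _mock/generateIncreasing.py | generate_increasing_decreasing_data
-- ===== SOURCE A (Python) =====
-- def generate_increasing_decreasing_data(total_points=10000):
--     # 初始化数据列表
--     data_points = []
--     max_value = 4095
--     # 生成递增至4095然后递减至0的数据序列
--     increasing = list(range(0, max_value + 1))
--     decreasing = list(range(max_value, -1, -1))
--     sequence = increasing + decreasing
--     # 重复序列
--
--     while len(data_points) < total_points:
--         data_points.extend(sequence)
--
--     # 超出截断
--     data_points = data_points[:total_points]
--     return data_points
-- ===== SOURCE B (Python) =====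
-- def generate_increasing_decreasing_data(total_points=10000):
--     # triangle wave of period 8192, computed per index in closed form
--     return [i % 8192 if i % 8192 <= 4095 else 8191 - i % 8192
--             for i in range(total_points)]
-- ===== Notes on version B (the rewrite author's own statement) =====
-- stated objective: simpler
-- what changed: Replaces building increasing+decreasing lists and repeatedly extending/truncating with a single comprehension computing each element in closed form from its index (i % 8192 folded at the 4095 peak).
import Mathlib
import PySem

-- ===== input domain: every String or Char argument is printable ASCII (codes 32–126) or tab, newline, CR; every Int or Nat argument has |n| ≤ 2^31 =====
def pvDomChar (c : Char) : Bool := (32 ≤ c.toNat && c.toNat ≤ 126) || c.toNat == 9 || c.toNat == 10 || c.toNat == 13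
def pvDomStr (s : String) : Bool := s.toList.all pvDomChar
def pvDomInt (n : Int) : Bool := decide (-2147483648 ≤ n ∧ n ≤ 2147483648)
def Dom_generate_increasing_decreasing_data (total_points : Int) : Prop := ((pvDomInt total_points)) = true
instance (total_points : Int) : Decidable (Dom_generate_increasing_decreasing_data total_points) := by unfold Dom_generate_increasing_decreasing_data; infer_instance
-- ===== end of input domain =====

-- B replaces the build-two-lists / extend-until-long-enough / truncate scheme with a
-- single comprehension computing each element in closed form from its index (simpler).

-- ===== PORT A =====
-- sequence = list(range(0, 4096)) + list(range(4095, -1, -1))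
def pvSeqA : List Int := PySem.List.pyRange 0 4096 1 ++ PySem.List.pyRange 4095 (-1) (-1)

-- while len(data_points) < total_points: data_points.extend(sequence)
def pvLoopA (total_points : Int) (acc : List Int) : List Int :=
  if (acc.length : Int) < total_points then pvLoopA total_points (acc ++ pvSeqA) else acc
termination_by (total_points - acc.length).toNat
decreasing_by
  simp [pvSeqA]
  omega

def generate_increasing_decreasing_data (total_points : Int) : List Int :=
  PySem.List.slice (pvLoopA total_points []) none (some total_points)

-- ===== PORT B =====
def generate_increasing_decreasing_data_alt (total_points : Int) : List Int :=
  (PySem.List.pyRange 0 total_points 1).map (fun i =>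
    if PySem.Int.mod i 8192 ≤ 4095 then PySem.Int.mod i 8192 else 8191 - PySem.Int.mod i 8192)

-- ===== PRECONDITION & SPEC =====
def Spec_generate_increasing_decreasing_data (total_points : Int) (out : List Int) : Prop := out = generate_increasing_decreasing_data_alt total_points
instance (total_points : Int) (out : List Int) : Decidable (Spec_generate_increasing_decreasing_data total_points out) := by unfold Spec_generate_increasing_decreasing_data; infer_instance

-- ===== CLAIM (what is proved, stated in full; the proofs are below) =====
def Claim_equal_generate_increasing_decreasing_data : Prop := ∀ (total_points : Int), Dom_generate_increasing_decreasing_data total_points → Spec_generate_increasing_decreasing_data total_points (generate_increasing_decreasing_data total_points)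

-- ===== LEMMAS AND PROOFS =====

-- the triangle wave as a function of the index
def pvTri (n : Nat) : Int :=
  if (n % 8192 : Nat) ≤ 4095 then ((n % 8192 : Nat) : Int) else 8191 - ((n % 8192 : Nat) : Int)

set_option maxRecDepth 4096 in
lemma pvSeqA_eq : pvSeqA = (List.range 8192).map pvTri := by
  unfold pvSeqA
  rw [PySem.List.pyRange_one, PySem.List.pyRange_neg_one]
  apply List.ext_getElem
  · simp
  · intro i h1 h2
    simp only [List.length_append, List.length_map, List.length_range] at h1
    rcases lt_or_ge i ((List.range (((4096 : Int) - 0).toNat)).map (fun k : Nat => (0 : Int) + k)).length with hlt | hge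
    · rw [List.getElem_append_left hlt]
      simp only [List.length_map, List.length_range] at hlt
      simp only [List.getElem_map, List.getElem_range, pvTri]
      have : i % 8192 = i := Nat.mod_eq_of_lt (by omega)
      rw [this]
      split
      · omega
      · omega
    · rw [List.getElem_append_right hge]
      simp only [List.length_map, List.length_range] at hge ⊢
      simp only [List.getElem_map, List.getElem_range, pvTri]
      have : i % 8192 = i := Nat.mod_eq_of_lt (by omega)
      rw [this]
      split
      · omega
      · omega

lemma pvRange_append_seq (c : Nat) :
    (List.range (c * 8192)).map pvTri ++ pvSeqA = (List.range ((c + 1) * 8192)).map pvTri := by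
  rw [pvSeqA_eq, show (c + 1) * 8192 = c * 8192 + 8192 from by ring, List.range_add,
     List.map_append, List.map_map]
  refine congrArg (fun t => (List.range (c * 8192)).map pvTri ++ t) ?_
  apply List.map_congr_left
  intro j hj
  simp only [Function.comp_apply, pvTri]
  have h : (c * 8192 + j) % 8192 = j % 8192 := by omega
  rw [h]

lemma pvLoopA_eq (total_points : Int) :
    ∀ (n c : Nat), (total_points - c * 8192).toNat ≤ n →
      ∃ M : Nat, pvLoopA total_points ((List.range (c * 8192)).map pvTri)
          = (List.range (M * 8192)).map pvTri ∧ total_points ≤ ((M * 8192 : Nat) : Int) := by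
  intro n
  induction n with
  | zero =>
    intro c hc
    refine ⟨c, ?_, by omega⟩
    rw [pvLoopA]
    simp only [List.length_map, List.length_range]
    rw [if_neg (by omega)]
  | succ n ih =>
    intro c hc
    by_cases h : (((List.range (c * 8192)).map pvTri).length : Int) < total_points
    · rw [pvLoopA, if_pos h, pvRange_append_seq c]
      simp only [List.length_map, List.length_range] at h
      exact ih (c + 1) (by push_cast; omega)
    · refine ⟨c, ?_, ?_⟩
      · rw [pvLoopA, if_neg h]
      · simp only [List.length_map, List.length_range] at h
        omega

lemma pvAlt_eq (total_points : Int) :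
    generate_increasing_decreasing_data_alt total_points
      = (List.range total_points.toNat).map pvTri := by
  unfold generate_increasing_decreasing_data_alt
  rw [PySem.List.pyRange_one]
  simp only [Int.sub_zero]
  rw [List.map_map]
  apply List.map_congr_left
  intro k hk
  simp only [Function.comp_apply, zero_add]
  have hmod : PySem.Int.mod (k : Int) 8192 = ((k % 8192 : Nat) : Int) := by
    exact_mod_cast PySem.Int.mod_natCast k 8192
  simp only [hmod, pvTri]
  split
  · rw [if_pos (by omega)]
  · rw [if_neg (by omega)]

-- ===== VERDICT (by name: the statement is the Claim_ definition above) =====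
theorem generate_increasing_decreasing_data_spec : Claim_equal_generate_increasing_decreasing_data := by
  intro total_points _
  unfold Spec_generate_increasing_decreasing_data generate_increasing_decreasing_data
  rw [pvAlt_eq]
  rcases le_or_gt 0 total_points with hpos | hneg
  · obtain ⟨M, hM, hle⟩ := pvLoopA_eq total_points (total_points).toNat 0 (by omega)
    simp only [Nat.zero_mul, List.range_zero, List.map_nil] at hM
    rw [hM, PySem.List.slice_to _ hpos]
    rw [← List.map_take, List.take_range]
    have hmin : min total_points.toNat (M * 8192) = total_points.toNat := by omega
    rw [hmin]
  · have hloop : pvLoopA total_points [] = [] := by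
      rw [pvLoopA]
      simp only [List.length_nil, Int.natCast_zero]
      rw [if_neg (by omega)]
    have htp : total_points.toNat = 0 := by omega
    rw [hloop, htp]
    simp only [List.range_zero, List.map_nil]
    have hk : total_points = -(((-total_points).toNat : Nat) : Int) := by omega
    rw [hk, PySem.List.slice_to_neg_natCast _ _ (by omega)]
    simp
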